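-- pv_equiv track=rewrite | github.com/dimk00z/summer_yandex_algorithmic_course | Homework_1/I_The Chateau_d_lf/I_The_Chateau_d_lf.py | check_brick
-- ===== SOURCE A (Python) =====
-- def check_brick(a, b, c, d, e) -> str:
--     hole = [d, e]
--     brick = [a, b, c]
--     matrix = []
--     result = 'NO'
--     for value in hole:
--         matrix.append([
--             value >= brick_side_value for brick_side_value in brick
--         ])
--
--     for position_first_line, first_line_value in enumerate(matrix[0]):
--         if not first_line_value:
--             continue
--         current_check = [
--             second_line_value for position_second_line,
--             second_line_value in enumerate(matrix[1])
--             if position_first_line != position_second_line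
--         ]
--         if any(current_check):
--             result = 'YES'
--     return result
-- ===== SOURCE B (Python) =====
-- def check_brick(a, b, c, d, e) -> str:
--     # Closed form: the two smallest brick sides must fit the sorted hole dims.
--     hmin, hmax = min(d, e), max(d, e)
--     s0 = min(a, b, c)
--     s2 = max(a, b, c)
--     s1 = a + b + c - s0 - s2
--     return 'YES' if s0 <= hmin and s1 <= hmax else 'NO'
-- ===== Notes on version B (the rewrite author's own statement) =====
-- stated objective: simpler
-- what changed: Replaced the boolean matrix and nested positional scan with a closed-form test: the two smallest brick sides (via min/max arithmetic) compared against the sorted hole dimensions.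
import Mathlib
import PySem

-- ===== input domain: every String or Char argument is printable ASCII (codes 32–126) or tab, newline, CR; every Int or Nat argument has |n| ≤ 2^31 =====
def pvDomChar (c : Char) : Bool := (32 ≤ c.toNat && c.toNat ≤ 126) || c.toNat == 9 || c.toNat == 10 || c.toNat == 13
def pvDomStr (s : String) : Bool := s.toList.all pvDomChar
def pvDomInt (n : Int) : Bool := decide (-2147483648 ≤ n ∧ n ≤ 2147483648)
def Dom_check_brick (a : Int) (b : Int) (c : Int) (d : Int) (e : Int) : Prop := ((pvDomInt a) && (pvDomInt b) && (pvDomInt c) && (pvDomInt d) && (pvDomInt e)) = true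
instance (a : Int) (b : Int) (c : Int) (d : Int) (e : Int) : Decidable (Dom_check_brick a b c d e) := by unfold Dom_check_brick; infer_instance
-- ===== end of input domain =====

-- ===== PORT A =====
-- Literal port of A: build the 2x3 boolean matrix, then scan row 0 and the
-- complementary entries of row 1, setting result to "YES" on a match.
-- matrix[0] / matrix[1] indexing is ported via pyGet?/getD; both indices are
-- always in range for the 2-element list literal.
def check_brick (a : Int) (b : Int) (c : Int) (d : Int) (e : Int) : String :=
  let hole : List Int := [d, e]
  let brick : List Int := [a, b, c]
  let matrix : List (List Bool) :=
    hole.map (fun value => brick.map (fun brick_side_value => decide (value ≥ brick_side_value)))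
  let row0 : List Bool := (PySem.List.pyGet? matrix 0).getD []
  let row1 : List Bool := (PySem.List.pyGet? matrix 1).getD []
  (PySem.List.enumerate row0).foldl
    (fun result p =>
      if !p.2 then result
      else
        let current_check : List Bool :=
          (PySem.List.enumerate row1).filterMap
            (fun q => if p.1 ≠ q.1 then some q.2 else none)
        if current_check.any id then "YES" else result)
    "NO"

-- ===== PORT B =====
-- Port of B: closed-form test — the two smallest brick sides against the
-- sorted hole dimensions.
def check_brick_alt (a : Int) (b : Int) (c : Int) (d : Int) (e : Int) : String :=
  let hmin := min d e
  let hmax := max d e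
  let s0 := min a (min b c)
  let s2 := max a (max b c)
  let s1 := a + b + c - s0 - s2
  if s0 ≤ hmin ∧ s1 ≤ hmax then "YES" else "NO"

-- ===== PRECONDITION & SPEC =====
def Spec_check_brick (a : Int) (b : Int) (c : Int) (d : Int) (e : Int) (out : String) : Prop := out = check_brick_alt a b c d e
instance (a : Int) (b : Int) (c : Int) (d : Int) (e : Int) (out : String) : Decidable (Spec_check_brick a b c d e out) := by unfold Spec_check_brick; infer_instance

-- ===== CLAIM (what is proved, stated in full; the proofs are below) =====
def Claim_equal_check_brick : Prop := ∀ (a : Int) (b : Int) (c : Int) (d : Int) (e : Int), Dom_check_brick a b c d e → Spec_check_brick a b c d e (check_brick a b c d e)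

-- ===== LEMMAS AND PROOFS =====

-- ===== VERDICT (by name: the statement is the Claim_ definition above) =====
set_option maxHeartbeats 2000000 in
theorem check_brick_spec : Claim_equal_check_brick := by
  intro a b c d e _
  unfold Spec_check_brick check_brick check_brick_alt
  by_cases h1 : d ≥ a <;> by_cases h2 : d ≥ b <;> by_cases h3 : d ≥ c <;>
    by_cases h4 : e ≥ a <;> by_cases h5 : e ≥ b <;> by_cases h6 : e ≥ c <;>
      simp [PySem.List.pyGet?, PySem.List.pyIdx?, PySem.List.enumerate_cons,
        PySem.List.enumerate_nil, h1, h2, h3, h4, h5, h6] <;>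
      omega
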